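-- pv_equiv track=rewrite | github.com/ebarlas/openjdk-mail-search | src/database.py | prepare_chunks_to_send
-- ===== SOURCE A (Python) =====
-- def prepare_chunks_to_send(request_items):
--     flattened = []
--     for table, reqs in request_items.items():
--         for r in reqs:
--             flattened.append((table, r))
--     chunks = [flattened[i:i + 25] for i in range(0, len(flattened), 25)]
--     to_sends = []
--     for chunk in chunks:
--         to_send = {}
--         for table, r in chunk:
--             to_send.setdefault(table, []).append(r)
--         to_sends.append(to_send)
--     return to_sends
-- ===== SOURCE B (Python) =====
-- def prepare_chunks_to_send(request_items):
--     # Single streaming pass: no intermediate flattened list, no slicing pass.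
--     to_sends = []
--     to_send = {}
--     count = 0
--     for table, reqs in request_items.items():
--         for r in reqs:
--             if count == 25:
--                 to_sends.append(to_send)
--                 to_send = {}
--                 count = 0
--             to_send.setdefault(table, []).append(r)
--             count += 1
--     if count > 0:
--         to_sends.append(to_send)
--     return to_sends
-- ===== Notes on version B (the rewrite author's own statement) =====
-- stated objective: alternative
-- what changed: Replaces A's three passes (flatten all items, slice into 25-element chunks, regroup each chunk into a dict) with one streaming pass that maintains the current dict and a counter, flushing whenever 25 items have been accumulated.
import Mathlib
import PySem

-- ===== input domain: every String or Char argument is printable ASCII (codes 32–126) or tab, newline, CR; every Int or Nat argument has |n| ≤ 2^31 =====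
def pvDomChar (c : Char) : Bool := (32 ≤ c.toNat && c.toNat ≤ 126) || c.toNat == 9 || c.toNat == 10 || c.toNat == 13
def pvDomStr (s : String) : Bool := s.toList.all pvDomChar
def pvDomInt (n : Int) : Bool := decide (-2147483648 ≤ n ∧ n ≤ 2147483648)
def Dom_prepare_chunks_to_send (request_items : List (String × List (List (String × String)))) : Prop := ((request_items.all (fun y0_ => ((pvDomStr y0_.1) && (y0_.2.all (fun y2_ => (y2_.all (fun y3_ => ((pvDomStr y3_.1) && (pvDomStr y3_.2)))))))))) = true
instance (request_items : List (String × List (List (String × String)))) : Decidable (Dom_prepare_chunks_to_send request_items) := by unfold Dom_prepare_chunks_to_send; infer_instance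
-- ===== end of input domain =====

-- B replaces A's flatten → slice-into-25s → regroup with a single streaming pass
-- keeping a current dict and counter (alternative decomposition, same asymptotic cost).


-- ===== PORT A =====
def prepare_chunks_to_send (request_items : List (String × List (List (String × String)))) : List (List (String × List (List (String × String)))) :=
  let flattened : List (String × List (String × String)) :=
    request_items.foldl (fun acc tr => tr.2.foldl (fun acc r => acc ++ [(tr.1, r)]) acc) []
  let chunks : List (List (String × List (String × String))) :=
    (PySem.List.pyRange 0 (flattened.length : Int) 25).map
      (fun i => PySem.List.slice flattened (some i) (some (i + 25)))
  chunks.foldl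
    (fun to_sends chunk =>
      to_sends ++
        [(chunk.foldl (fun d p => d.modify p.1 [] (· ++ [p.2]))
            (PySem.Dict.empty : PySem.Dict String (List (List (String × String))))).items])
    []

-- ===== PORT B =====
def prepare_chunks_to_send_alt (request_items : List (String × List (List (String × String)))) : List (List (String × List (List (String × String)))) :=
  let fin :=
    request_items.foldl
      (fun st tr =>
        tr.2.foldl
          (fun (st : List (List (String × List (List (String × String)))) ×
                     PySem.Dict String (List (List (String × String))) × Int) r =>
            let st' := if st.2.2 = 25 then (st.1 ++ [st.2.1.items], PySem.Dict.empty, (0 : Int)) else st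
            (st'.1, st'.2.1.modify tr.1 [] (· ++ [r]), st'.2.2 + 1))
          st)
      (([], PySem.Dict.empty, (0 : Int)))
  if fin.2.2 > 0 then fin.1 ++ [fin.2.1.items] else fin.1

-- ===== PRECONDITION & SPEC =====
def Spec_prepare_chunks_to_send (request_items : List (String × List (List (String × String)))) (out : List (List (String × List (List (String × String))))) : Prop := out = prepare_chunks_to_send_alt request_items
instance (request_items : List (String × List (List (String × String)))) (out : List (List (String × List (List (String × String))))) : Decidable (Spec_prepare_chunks_to_send request_items out) := by unfold Spec_prepare_chunks_to_send; infer_instance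

-- ===== CLAIM (what is proved, stated in full; the proofs are below) =====
def Claim_equal_prepare_chunks_to_send : Prop := ∀ (request_items : List (String × List (List (String × String)))), Dom_prepare_chunks_to_send request_items → Spec_prepare_chunks_to_send request_items (prepare_chunks_to_send request_items)

-- ===== LEMMAS AND PROOFS =====

-- Abbreviations for the types involved.
abbrev PvPair : Type := String × List (String × String)
abbrev PvDict : Type := PySem.Dict String (List (List (String × String)))
abbrev PvOut : Type := List (String × List (List (String × String)))

-- The common dict-building step (Python's `to_send.setdefault(table, []).append(r)`).
def pvDStep (d : PvDict) (p : PvPair) : PvDict := d.modify p.1 [] (· ++ [p.2])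

-- Dict built from a list of (table, req) pairs.
def pvGD (c : List PvPair) : PvDict := c.foldl pvDStep PySem.Dict.empty

-- Structural chunking into groups of 25.
def pvChunks (xs : List PvPair) : List (List PvPair) :=
  if h : xs = [] then [] else xs.take 25 :: pvChunks (xs.drop 25)
termination_by xs.length
decreasing_by
  have : xs.length ≠ 0 := fun hl => h (List.eq_nil_of_length_eq_zero hl)
  simp [List.length_drop]; omega

-- B's streaming step and finisher.
def pvStep (st : List PvOut × PvDict × Int) (p : PvPair) : List PvOut × PvDict × Int :=
  let st' := if st.2.2 = 25 then (st.1 ++ [st.2.1.items], PySem.Dict.empty, (0 : Int)) else st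
  (st'.1, pvDStep st'.2.1 p, st'.2.2 + 1)

def pvFinish (st : List PvOut × PvDict × Int) : List PvOut :=
  if st.2.2 > 0 then st.1 ++ [st.2.1.items] else st.1

-- A's flatten loop produces init ++ flatMap.
theorem pvFlatten_eq (ri : List (String × List (List (String × String)))) (init : List PvPair) :
    ri.foldl (fun acc tr => tr.2.foldl (fun acc r => acc ++ [(tr.1, r)]) acc) init
      = init ++ ri.flatMap (fun tr => tr.2.map (fun r => (tr.1, r))) := by
  induction ri generalizing init with
  | nil => simp
  | cons x xs ih =>
    have hin : x.2.foldl (fun acc r => acc ++ [(x.1, r)]) init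
        = init ++ x.2.map (fun r => (x.1, r)) := by
      induction x.2 generalizing init with
      | nil => simp
      | cons y ys ihy => rw [List.foldl_cons, ihy]; simp
    rw [List.foldl_cons, hin, ih]
    simp [List.flatMap_cons]

-- A's output loop is a map over the chunks.
theorem pvPush_eq (l : List (List PvPair)) (init : List PvOut) :
    l.foldl (fun s c => s ++ [(pvGD c).items]) init = init ++ l.map (fun c => (pvGD c).items) := by
  induction l generalizing init with
  | nil => simp
  | cons c cs ih => simp [List.foldl_cons, ih]

-- The slice/pyRange chunking equals structural chunking.
theorem pvSlices_eq (m : Nat) : ∀ (xs : List PvPair), xs.length ≤ m →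
    (PySem.List.pyRange 0 (xs.length : Int) 25).map
        (fun i => PySem.List.slice xs (some i) (some (i + 25))) = pvChunks xs := by
  induction m with
  | zero =>
    intro xs h
    have : xs = [] := List.eq_nil_of_length_eq_zero (Nat.le_zero.mp h)
    subst this
    rw [pvChunks]
    simp [PySem.List.pyRange_of_pos 0 0 (by norm_num : (0:Int) < 25)]
  | succ m ih =>
    intro xs h
    by_cases hnil : xs = []
    · subst hnil
      rw [pvChunks]
      simp [PySem.List.pyRange_of_pos 0 0 (by norm_num : (0:Int) < 25)]
    · have hlen : 1 ≤ xs.length := by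
        rcases Nat.eq_zero_or_pos xs.length with h0 | h0
        · exact absurd (List.eq_nil_of_length_eq_zero h0) hnil
        · exact h0
      have hlt : (0 : Int) < (xs.length : Int) := by exact_mod_cast hlen
      have hc : PySem.List.pyRange 0 (xs.length : Int) 25
          = List.map (fun k : Nat => (25 : Int) * (k : Int)) (List.range ((xs.length + 24) / 25)) := by
        rw [PySem.List.pyRange_of_pos 0 (xs.length : Int) (by norm_num : (0:Int) < 25),
          if_pos hlt]
        have h1 : ((xs.length : Int) - 0 + 25 - 1) / 25 = (((xs.length + 24) / 25 : Nat) : Int) := by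
          omega
        rw [h1, Int.toNat_natCast]
        exact List.map_congr_left (fun k _ => by ring)
      have hc' : PySem.List.pyRange 0 ((xs.drop 25).length : Int) 25
          = List.map (fun k : Nat => (25 : Int) * (k : Int)) (List.range ((xs.length - 1) / 25)) := by
        rw [List.length_drop]
        by_cases hd : xs.length ≤ 25
        · have h0 : xs.length - 25 = 0 := by omega
          have hr : (xs.length - 1) / 25 = 0 := by omega
          rw [h0, hr, Nat.cast_zero, PySem.List.pyRange_of_pos 0 0 (by norm_num : (0:Int) < 25)]
          simp
        · have hlt25 : (0 : Int) < ((xs.length - 25 : Nat) : Int) := by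
            exact_mod_cast (by omega : 0 < xs.length - 25)
          rw [PySem.List.pyRange_of_pos 0 _ (by norm_num : (0:Int) < 25), if_pos hlt25]
          have h1 : (((xs.length - 25 : Nat) : Int) - 0 + 25 - 1) / 25
              = (((xs.length - 1) / 25 : Nat) : Int) := by omega
          rw [h1, Int.toNat_natCast]
          exact List.map_congr_left (fun k _ => by ring)
      have hcnt : (xs.length + 24) / 25 = (xs.length - 1) / 25 + 1 := by omega
      have ihd := ih (xs.drop 25) (by rw [List.length_drop]; omega)
      rw [hc', List.map_map] at ihd
      rw [hc, hcnt, List.range_succ_eq_map, pvChunks, dif_neg hnil]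
      simp only [List.map_cons, List.map_map]
      refine List.cons_eq_cons.mpr ⟨?_, ?_⟩
      · -- head chunk: xs[0:25] = xs.take 25
        have h1 := PySem.List.slice_toNat xs (a := (0 : Int)) (b := (25 : Int))
          (by norm_num) (by norm_num)
        norm_num at h1
        simpa using h1
      · -- remaining chunks: shift every index down by 25
        rw [← ihd]
        apply List.map_congr_left
        intro k _
        simp only [Function.comp_apply]
        have hpush : (25 : Int) * ((Nat.succ k : Nat) : Int) = 25 * ((k : Int) + 1) := by
          push_cast; ring
        have h1 := PySem.List.slice_toNat xs (a := 25 * ((k : Int) + 1))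
          (b := 25 * ((k : Int) + 1) + 25) (by positivity) (by positivity)
        have h2 := PySem.List.slice_toNat (xs.drop 25) (a := 25 * ((k : Nat) : Int))
          (b := 25 * ((k : Nat) : Int) + 25) (by positivity) (by positivity)
        have e1 : (25 * ((k:Int) + 1)).toNat = 25 * k + 25 := by omega
        have e2 : (25 * ((k:Int) + 1) + 25).toNat = 25 * k + 50 := by omega
        have e3 : (25 * ((k : Nat) : Int)).toNat = 25 * k := by omega
        have e4 : (25 * ((k : Nat) : Int) + 25).toNat = 25 * k + 25 := by omega
        rw [hpush, h1, h2, e1, e2, e3, e4, List.drop_drop]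
        have e5 : 25 * k + 50 - (25 * k + 25) = 25 := by omega
        have e6 : 25 * k + 25 - 25 * k = 25 := by omega
        have e7 : 25 * k + 25 = 25 + 25 * k := by omega
        rw [e5, e6, e7]

-- pvChunks of a list of length ≤ 25.
theorem pvChunks_small (p : List PvPair) (h : p.length ≤ 25) (hne : p ≠ []) :
    pvChunks p = [p] := by
  rw [pvChunks]
  simp [if_neg hne, List.take_of_length_le h, List.drop_eq_nil_of_le h, pvChunks]

theorem pvChunks_full (p : List PvPair) (l : List PvPair) (h : p.length = 25) :
    pvChunks (p ++ l) = p :: pvChunks l := by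
  have hne : p ++ l ≠ [] := by
    intro hc
    have := congrArg List.length hc
    simp [h] at this
  rw [pvChunks]
  simp only [dif_neg hne]
  congr 1
  · rw [← h, List.take_left]
  · rw [← h, List.drop_left]

-- Main invariant of the streaming loop.
theorem pvMain (f : List PvPair) : ∀ (sends : List PvOut) (p : List PvPair), p.length ≤ 25 →
    pvFinish (f.foldl pvStep (sends, pvGD p, (p.length : Int)))
      = sends ++ (pvChunks (p ++ f)).map (fun c => (pvGD c).items) := by
  induction f with
  | nil =>
    intro sends p hp
    simp only [List.foldl_nil, List.append_nil]
    by_cases hne : p = []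
    · subst hne
      rw [pvChunks]
      simp [pvFinish]
    · have hlen : 0 < p.length := List.length_pos_of_ne_nil hne
      rw [pvChunks_small p hp hne]
      simp only [pvFinish, List.map_cons, List.map_nil]
      rw [if_pos (by exact_mod_cast hlen)]
  | cons x f' ih =>
    intro sends p hp
    by_cases h25 : p.length = 25
    · have hstep : pvStep (sends, pvGD p, (p.length : Int)) x
          = (sends ++ [(pvGD p).items], pvGD [x], (([x] : List PvPair).length : Int)) := by
        simp only [pvStep]
        rw [if_pos (by exact_mod_cast h25)]
        simp [pvGD, pvDStep]
      rw [List.foldl_cons, hstep, ih (sends ++ [(pvGD p).items]) [x] (by simp)]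
      rw [show p ++ x :: f' = p ++ ([x] ++ f') by simp,
        pvChunks_full p ([x] ++ f') h25]
      simp [List.append_assoc]
    · have hlt : p.length < 25 := lt_of_le_of_ne hp h25
      have hstep : pvStep (sends, pvGD p, (p.length : Int)) x
          = (sends, pvGD (p ++ [x]), ((p ++ [x]).length : Int)) := by
        simp only [pvStep]
        rw [if_neg (by exact_mod_cast h25)]
        simp [pvGD, pvDStep, List.foldl_append]
      rw [List.foldl_cons, hstep, ih sends (p ++ [x]) (by simp; omega), List.append_assoc]
      simp

-- B's nested loop is the streaming fold over the flattened pairs.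
theorem pvNested_eq (ri : List (String × List (List (String × String)))) :
    ∀ (st : List PvOut × PvDict × Int),
    ri.foldl (fun st tr => tr.2.foldl (fun st r => pvStep st (tr.1, r)) st) st
      = (ri.flatMap (fun tr => tr.2.map (fun r => (tr.1, r)))).foldl pvStep st := by
  induction ri with
  | nil => intro st; simp
  | cons x xs ih =>
    intro st
    rw [List.foldl_cons, ih, List.flatMap_cons, List.foldl_append, List.foldl_map]

-- ===== VERDICT (by name: the statement is the Claim_ definition above) =====
theorem prepare_chunks_to_send_spec : Claim_equal_prepare_chunks_to_send := by
  intro ri _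
  unfold Spec_prepare_chunks_to_send
  show prepare_chunks_to_send ri = prepare_chunks_to_send_alt ri
  have hflat : ri.foldl (fun acc tr => tr.2.foldl (fun acc r => acc ++ [(tr.1, r)]) acc) []
      = ri.flatMap (fun tr => tr.2.map (fun r => (tr.1, r))) := by
    simpa using pvFlatten_eq ri []
  have hA : prepare_chunks_to_send ri
      = (pvChunks (ri.flatMap (fun tr => tr.2.map (fun r => (tr.1, r))))).map
          (fun c => (pvGD c).items) := by
    show ((PySem.List.pyRange 0
          (((ri.foldl (fun acc tr => tr.2.foldl (fun acc r => acc ++ [(tr.1, r)]) acc) []).length : Int)) 25).map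
        (fun i => PySem.List.slice
          (ri.foldl (fun acc tr => tr.2.foldl (fun acc r => acc ++ [(tr.1, r)]) acc) [])
          (some i) (some (i + 25)))).foldl (fun s c => s ++ [(pvGD c).items]) []
      = _
    rw [hflat, pvSlices_eq (ri.flatMap (fun tr => tr.2.map (fun r => (tr.1, r)))).length _ le_rfl,
      pvPush_eq]
    simp
  have hB : prepare_chunks_to_send_alt ri
      = pvFinish ((ri.flatMap (fun tr => tr.2.map (fun r => (tr.1, r)))).foldl pvStep
          ([], PySem.Dict.empty, (0 : Int))) := by
    show pvFinish (ri.foldl (fun st tr => tr.2.foldl (fun st r => pvStep st (tr.1, r)) st)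
        ([], PySem.Dict.empty, (0 : Int))) = _
    rw [pvNested_eq]
  have hM := pvMain (ri.flatMap (fun tr => tr.2.map (fun r => (tr.1, r)))) [] [] (by simp)
  simp only [List.nil_append] at hM
  rw [hA, hB]
  exact (hM.trans (by simp)).symm
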